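-- pv_equiv track=rewrite | github.com/JuanRx19/Ada2024-1 | Tarea 1/teorico.py | n_factorial
-- ===== SOURCE A (Python) =====
-- import math
--
-- def n_factorial(microseg):
--     n = 1
--     flag = 0
--     while flag == 0:
--         tiempo = n * math.factorial(n)
--         if tiempo > microseg:
--             flag = 1
--         n += 1
--     return n
-- ===== SOURCE B (Python) =====
-- from itertools import accumulate, count, takewhile
--
--
-- def n_factorial(microseg):
--     # n*n! is strictly increasing, so the answer is
--     # 2 + (how many n >= 1 satisfy n * n! <= microseg).
--     facts = accumulate(count(1), lambda f, n: f * n)          # 1!, 2!, 3!, ...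
--     terms = (n * f for n, f in zip(count(1), facts))          # n * n!
--     return 2 + sum(1 for _ in takewhile(lambda t: t <= microseg, terms))
-- ===== Notes on version B (the rewrite author's own statement) =====
-- stated objective: alternative
-- what changed: B replaces A's flag-driven while loop that recomputes math.factorial(n) every iteration by a lazy itertools pipeline: an accumulate of running factorials zipped with a counter, with takewhile counting how many n satisfy n*n! <= microseg, returning two plus that count; each step costs one multiplication instead of a full factorial recomputation, though the answer is so small for any representable input that wall-clock speed is unmeasurable.
import Mathlib
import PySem

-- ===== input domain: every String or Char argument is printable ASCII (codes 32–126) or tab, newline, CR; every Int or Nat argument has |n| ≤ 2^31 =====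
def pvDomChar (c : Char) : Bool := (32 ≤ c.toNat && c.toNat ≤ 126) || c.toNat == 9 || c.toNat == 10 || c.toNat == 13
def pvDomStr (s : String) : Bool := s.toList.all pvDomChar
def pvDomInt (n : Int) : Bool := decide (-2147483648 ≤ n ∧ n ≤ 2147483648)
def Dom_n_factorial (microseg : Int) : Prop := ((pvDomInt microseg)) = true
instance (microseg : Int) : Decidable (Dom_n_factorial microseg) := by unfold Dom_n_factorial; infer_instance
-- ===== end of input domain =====

-- B counts, with a lazily accumulated factorial, how many n satisfy n*n! ≤ microseg and returns
-- 2 + that count, replacing A's per-step math.factorial recomputation (objective: alternative, cheaper per step; speed not measurable at these sizes).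

-- ===== PORT A =====
-- A's loop: n = 1; while n * factorial(n) ≤ microseg: n += 1; return (that n) + 1.
-- (A's 'flag' exit performs one final n += 1 after the condition fires, hence the n + 1.)
def n_factorial_loopA (microseg : Int) (n : Nat) (hn : 0 < n) : Int :=
  if h : (n : Int) * (Nat.factorial n : Int) > microseg then ((n : Int) + 1)
  else n_factorial_loopA microseg (n + 1) (Nat.succ_pos n)
termination_by microseg.toNat + 1 - n
decreasing_by
  have h1 : (n : Int) ≤ (n : Int) * (Nat.factorial n : Int) := by
    have := Nat.factorial_pos n
    nlinarith [Int.natCast_pos.mpr hn, Int.natCast_pos.mpr this]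
  have h2 : (n : Int) ≤ microseg := le_trans h1 (not_lt.mp h)
  omega

def n_factorial (microseg : Int) : Int := n_factorial_loopA microseg 1 Nat.one_pos

-- ===== PORT B =====
-- B counts the length of the takewhile prefix: how many k ≥ 1 have k * k! ≤ microseg,
-- maintaining the factorial f lazily along the count; the answer is 2 + that count.
def n_factorial_prefixLen (microseg : Int) (k f : Nat) (hk : 1 ≤ k) (hf : 1 ≤ f) : Nat :=
  if c : (k : Int) * (f : Int) ≤ microseg then
    n_factorial_prefixLen microseg (k + 1) (f * (k + 1)) (Nat.le_succ_of_le hk)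
      (Nat.one_le_iff_ne_zero.mpr (by positivity)) + 1
  else 0
termination_by microseg.toNat + 1 - k
decreasing_by
  have hk' : (1 : Int) ≤ (k : Int) := by exact_mod_cast hk
  have hf' : (1 : Int) ≤ (f : Int) := by exact_mod_cast hf
  have hkm : (k : Int) ≤ microseg :=
    le_trans (le_mul_of_one_le_right (by linarith) hf') c
  omega

def n_factorial_alt (microseg : Int) : Int :=
  2 + ((n_factorial_prefixLen microseg 1 1 le_rfl le_rfl : Nat) : Int)

-- ===== PRECONDITION & SPEC =====
def Spec_n_factorial (microseg : Int) (out : Int) : Prop := out = n_factorial_alt microseg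
instance (microseg : Int) (out : Int) : Decidable (Spec_n_factorial microseg out) := by unfold Spec_n_factorial; infer_instance

-- ===== CLAIM (what is proved, stated in full; the proofs are below) =====
def Claim_equal_n_factorial : Prop := ∀ (microseg : Int), Dom_n_factorial microseg → Spec_n_factorial microseg (n_factorial microseg)

-- ===== LEMMAS AND PROOFS =====

-- Invariant: when B's accumulator equals n!, A's loop result is n + 1 + (B's remaining count).
theorem n_factorial_loop_agree (microseg : Int) (n : Nat) (hn : 0 < n) :
    n_factorial_loopA microseg n hn
      = (n : Int) + 1
        + ((n_factorial_prefixLen microseg n (Nat.factorial n) hn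
              (Nat.factorial_pos n) : Nat) : Int) := by
  rw [n_factorial_loopA, n_factorial_prefixLen]
  by_cases h : (n : Int) * (Nat.factorial n : Int) > microseg
  · simp [h, not_le.mpr h]
  · simp only [h, not_lt.mp h, dif_pos, dif_neg, not_false_iff]
    have hfa : Nat.factorial n * (n + 1) = Nat.factorial (n + 1) := by
      rw [Nat.factorial_succ]; ring
    have ih := n_factorial_loop_agree microseg (n + 1) (Nat.succ_pos n)
    simp only [← hfa] at ih
    rw [ih]
    push_cast
    ring
termination_by microseg.toNat + 1 - n
decreasing_by
  have h1 : (n : Int) ≤ (n : Int) * (Nat.factorial n : Int) := by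
    nlinarith [Int.natCast_pos.mpr hn, Int.natCast_pos.mpr (Nat.factorial_pos n)]
  have h2 : (n : Int) ≤ microseg := le_trans h1 (not_lt.mp h)
  omega

-- ===== VERDICT (by name: the statement is the Claim_ definition above) =====
theorem n_factorial_spec : Claim_equal_n_factorial := by
  intro microseg _
  unfold Spec_n_factorial n_factorial n_factorial_alt
  have h := n_factorial_loop_agree microseg 1 Nat.one_pos
  simpa [Nat.factorial] using h
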